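-- pv_equiv track=rewrite | github.com/AbdulaiBah/cps242-assignments | 01-numbers/number_repr.py | to_ones_comp_binary_from_dec
-- ===== SOURCE A (Python) =====
-- def to_unsigned_binary_from_dec(n, bits=8):
--     '''
--     Converts a decimal number to unsigned binary.
--     '''
--     binary = []
--     while n > 0:
--         binary.insert(0,n % 2)
--         n //= 2
--     if len(binary) < bits:
--         binary = [0] * (bits - len(binary)) + binary
--     return binary
--
-- def to_ones_comp_binary_from_dec(n, bits=8):
--     '''
--     Converts a decimal number to one's complement binary.
--     '''
--     binary = []
--     if n < 0:
--         n *= -1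
--         binary = to_unsigned_binary_from_dec(n,bits)
--         i = 0
--         while i < len(binary):
--             if binary[i] == 1:
--                 binary [i] = 0
--             elif binary[i] == 0:
--                 binary [i] = 1
--             i+=1
--     else:
--         binary = to_unsigned_binary_from_dec(n,bits)
--     return binary
-- ===== SOURCE B (Python) =====
-- def to_ones_comp_binary_from_dec(n, bits=8):
--     '''
--     Converts a decimal number to one's complement binary.
--     '''
--     mag = abs(n)
--     width = max(bits, mag.bit_length())
--     flip = 1 if n < 0 else 0
--     return [((mag >> (width - 1 - i)) & 1) ^ flip for i in range(width)]
-- ===== Notes on version B (the rewrite author's own statement) =====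
-- stated objective: simpler
-- what changed: Replaces A's three phases (LSB-first div/mod loop with insert(0), a separate zero-padding step, and a second index loop that flips bits for negatives) by a single MSB-first comprehension over range(max(bits, abs(n).bit_length())) that extracts each bit by shift-and-mask and XORs in the complement inline.
import Mathlib
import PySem

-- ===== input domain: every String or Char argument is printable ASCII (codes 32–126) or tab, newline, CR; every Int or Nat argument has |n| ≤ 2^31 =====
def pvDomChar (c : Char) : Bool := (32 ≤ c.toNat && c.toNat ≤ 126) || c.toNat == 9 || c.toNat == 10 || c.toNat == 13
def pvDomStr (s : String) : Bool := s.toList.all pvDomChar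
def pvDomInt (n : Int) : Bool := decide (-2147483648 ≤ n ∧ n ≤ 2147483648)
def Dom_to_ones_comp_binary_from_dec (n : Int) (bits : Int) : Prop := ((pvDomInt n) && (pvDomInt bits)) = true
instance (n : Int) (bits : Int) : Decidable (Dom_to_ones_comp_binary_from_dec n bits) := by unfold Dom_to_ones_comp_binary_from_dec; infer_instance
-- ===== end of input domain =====

-- B replaces A's LSB-first div/mod loop + separate pad and flip passes by one MSB-first
-- shift-and-mask pass with the complement XORed in; proved to return the same list on all ints.

-- ===== PORT A =====
-- 'while n > 0: binary.insert(0, n % 2); n //= 2'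
def pvLoopA (n : Int) (binary : List Int) : List Int :=
  if _h : n > 0 then pvLoopA (PySem.Int.floordiv n 2) (PySem.Int.mod n 2 :: binary) else binary
termination_by n.toNat
decreasing_by
  have : PySem.Int.floordiv n 2 = n / 2 := PySem.Int.floordiv_eq_ediv_of_pos (by omega)
  rw [this]; omega

def to_unsigned_binary_from_dec (n : Int) (bits : Int) : List Int :=
  if (((pvLoopA n []).length : Nat) : Int) < bits then
    List.replicate (bits - (((pvLoopA n []).length : Nat) : Int)).toNat 0 ++ pvLoopA n []
  else pvLoopA n []

-- 'while i < len(binary): if binary[i]==1: …=0 elif binary[i]==0: …=1; i+=1'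
def pvFlip : List Int → List Int
  | [] => []
  | b :: rest => (if b = 1 then 0 else if b = 0 then 1 else b) :: pvFlip rest

def to_ones_comp_binary_from_dec (n : Int) (bits : Int) : List Int :=
  if n < 0 then pvFlip (to_unsigned_binary_from_dec (-n) bits)
  else to_unsigned_binary_from_dec n bits

-- ===== PORT B =====
-- the shift amount (width-1-i) is nonnegative for every i of the range, so .toNat is exact
def to_ones_comp_binary_from_dec_alt (n : Int) (bits : Int) : List Int :=
  let mag : Int := if n < 0 then -n else n
  let width : Int := max bits ((PySem.Int.bitLength mag : Nat) : Int)
  let flip : Int := if n < 0 then 1 else 0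
  (PySem.List.pyRange 0 width 1).map (fun i =>
    PySem.Int.bxor (PySem.Int.band (mag >>> (width - 1 - i).toNat) 1) flip)

-- ===== PRECONDITION & SPEC =====
def Spec_to_ones_comp_binary_from_dec (n : Int) (bits : Int) (out : List Int) : Prop := out = to_ones_comp_binary_from_dec_alt n bits
instance (n : Int) (bits : Int) (out : List Int) : Decidable (Spec_to_ones_comp_binary_from_dec n bits out) := by unfold Spec_to_ones_comp_binary_from_dec; infer_instance

-- ===== CLAIM (what is proved, stated in full; the proofs are below) =====
def Claim_equal_to_ones_comp_binary_from_dec : Prop := ∀ (n : Int) (bits : Int), Dom_to_ones_comp_binary_from_dec n bits → Spec_to_ones_comp_binary_from_dec n bits (to_ones_comp_binary_from_dec n bits)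

-- ===== LEMMAS AND PROOFS =====

-- the list A's while-loop builds, as a Nat recursion (MSB first)
def pvBitsN : Nat → List Nat
  | 0 => []
  | m + 1 => pvBitsN ((m + 1) / 2) ++ [(m + 1) % 2]
decreasing_by exact Nat.div_lt_self (Nat.succ_pos m) one_lt_two

-- the canonical MSB-first window of width w
def pvG (w m : Nat) : List Nat := (List.range w).map (fun i => (m >>> (w - 1 - i)) &&& 1)

theorem pvLoopA_eq (m : Nat) : ∀ acc, pvLoopA (m : Int) acc = (pvBitsN m).map Int.ofNat ++ acc := by
  induction m using Nat.strong_induction_on with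
  | _ m ih =>
    intro acc
    match m with
    | 0 => simp [pvLoopA, pvBitsN]
    | m + 1 =>
      rw [pvLoopA]
      have h2 : PySem.Int.floordiv ((m + 1 : Nat) : Int) 2 = (((m + 1) / 2 : Nat) : Int) := by
        exact_mod_cast PySem.Int.floordiv_natCast (m + 1) 2
      have h3 : PySem.Int.mod ((m + 1 : Nat) : Int) 2 = (((m + 1) % 2 : Nat) : Int) := by
        exact_mod_cast PySem.Int.mod_natCast (m + 1) 2
      simp only [show ((m + 1 : Nat) : Int) > 0 by exact_mod_cast Nat.succ_pos m, dif_pos, h2, h3]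
      rw [ih ((m + 1) / 2) (Nat.div_lt_self (Nat.succ_pos m) one_lt_two)]
      simp [pvBitsN]

theorem pvBitsN_length (m : Nat) : (pvBitsN m).length = PySem.Int.bitLength (m : Int) := by
  induction m using Nat.strong_induction_on with
  | _ m ih =>
    match m with
    | 0 => simp [pvBitsN, PySem.Int.bitLength_zero]
    | m + 1 =>
      rw [pvBitsN, PySem.Int.bitLength_natCast (Nat.succ_pos m)]
      simp [ih ((m + 1) / 2) (Nat.div_lt_self (Nat.succ_pos m) one_lt_two)]

theorem pvG_succ (w m : Nat) : pvG (w + 1) m = pvG w (m / 2) ++ [m % 2] := by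
  unfold pvG
  rw [List.range_succ, List.map_append]
  congr 1
  · apply List.map_congr_left
    intro i hi
    rw [List.mem_range] at hi
    have h1 : w + 1 - 1 - i = (w - 1 - i) + 1 := by omega
    rw [h1, Nat.shiftRight_eq_div_pow, Nat.shiftRight_eq_div_pow, pow_succ,
      mul_comm, ← Nat.div_div_eq_div_mul]
  · simp [Nat.and_one_is_mod]

theorem pvBitsN_eq_pvG (m : Nat) : pvBitsN m = pvG (PySem.Int.bitLength (m : Int)) m := by
  induction m using Nat.strong_induction_on with
  | _ m ih =>
    match m with
    | 0 => simp [pvBitsN, PySem.Int.bitLength_zero, pvG]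
    | m + 1 =>
      rw [pvBitsN, PySem.Int.bitLength_natCast (Nat.succ_pos m), pvG_succ,
        ih ((m + 1) / 2) (Nat.div_lt_self (Nat.succ_pos m) one_lt_two)]

theorem pvG_cons_zero (s m : Nat) (h : m < 2 ^ s) : pvG (s + 1) m = 0 :: pvG s m := by
  unfold pvG
  rw [List.range_succ_eq_map, List.map_cons, List.map_map]
  congr 1
  · simp only [Nat.add_sub_cancel, Nat.sub_zero]
    simp [Nat.shiftRight_eq_div_pow, Nat.div_eq_of_lt h]
  · apply List.map_congr_left
    intro i _
    simp only [Function.comp]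
    congr 2
    omega

theorem pvG_pad (w k m : Nat) (h : m < 2 ^ w) :
    List.replicate k 0 ++ pvG w m = pvG (w + k) m := by
  induction k with
  | zero => simp
  | succ k ihk =>
    have hk : m < 2 ^ (w + k) := lt_of_lt_of_le h (Nat.pow_le_pow_right (by omega) (by omega))
    rw [show w + (k + 1) = (w + k) + 1 by omega, pvG_cons_zero _ _ hk, ← ihk]
    simp [List.replicate_succ]

theorem pvG_le_one (w m : Nat) : ∀ b ∈ pvG w m, b ≤ 1 := by
  intro b hb
  unfold pvG at hb
  rw [List.mem_map] at hb
  obtain ⟨i, _, rfl⟩ := hb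
  rw [Nat.and_one_is_mod]
  omega

theorem pvFlip_map (l : List Nat) (h : ∀ b ∈ l, b ≤ 1) :
    pvFlip (l.map Int.ofNat) = l.map (fun b => Int.ofNat (b ^^^ 1)) := by
  induction l with
  | nil => rfl
  | cons b rest ih =>
    have hb := h b (by simp)
    rw [List.map_cons, List.map_cons, pvFlip, ih (fun x hx => h x (by simp [hx]))]
    interval_cases b <;> simp

-- the unsigned part equals the canonical window of width W = max(bits, bitLength)
theorem pvUnsigned_eq (m : Nat) (bits : Int) :
    to_unsigned_binary_from_dec (m : Int) bits
      = (pvG (max bits ((PySem.Int.bitLength (m : Int) : Nat) : Int)).toNat m).map Int.ofNat := by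
  have hL : PySem.Int.bitLength (m : Int) = PySem.Int.bitLength (m : Int) := rfl
  generalize hLdef : PySem.Int.bitLength (m : Int) = L at *
  unfold to_unsigned_binary_from_dec
  rw [pvLoopA_eq m []]
  have hlen : (((pvBitsN m).map Int.ofNat ++ []).length : Nat) = L := by
    simp [pvBitsN_length m, hLdef]
  have hm : m < 2 ^ L := by
    have := PySem.Int.lt_two_pow_bitLength (m : Int)
    rw [hLdef] at this
    simpa using this
  rw [hlen]
  by_cases hb : (L : Int) < bits
  · rw [if_pos hb]
    have hW : (max bits ((L : Nat) : Int)).toNat = L + (bits - (L : Int)).toNat := by omega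
    rw [hW, ← pvG_pad L ((bits - (L : Int)).toNat) m hm, pvBitsN_eq_pvG, hLdef]
    simp
  · rw [if_neg hb]
    have hW : (max bits ((L : Nat) : Int)).toNat = L := by omega
    rw [hW, pvBitsN_eq_pvG, hLdef]
    simp

-- B's comprehension equals the canonical window (XORed with the flip bit)
theorem pvAlt_eq (mag : Int) (bits : Int) (f : Nat) (hmag : 0 ≤ mag) :
    ((PySem.List.pyRange 0 (max bits ((PySem.Int.bitLength mag : Nat) : Int)) 1).map (fun i =>
      PySem.Int.bxor (PySem.Int.band (mag >>> ((max bits ((PySem.Int.bitLength mag : Nat) : Int)) - 1 - i).toNat) 1) (f : Int)))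
    = (pvG (max bits ((PySem.Int.bitLength mag : Nat) : Int)).toNat mag.toNat).map (fun b => Int.ofNat (b ^^^ f)) := by
  set W : Int := max bits ((PySem.Int.bitLength mag : Nat) : Int) with hWdef
  have hW0 : 0 ≤ W := le_trans (by positivity) (le_max_right _ _)
  have hWn : W = ((W.toNat : Nat) : Int) := by omega
  rw [hWn, PySem.List.pyRange_zero_natCast, List.map_map]
  unfold pvG
  rw [List.map_map]
  apply List.map_congr_left
  intro j hj
  rw [List.mem_range] at hj
  simp only [Function.comp]
  have hsh : ((((W.toNat : Nat) : Int)) - 1 - ((j : Nat) : Int)).toNat = W.toNat - 1 - j := by omega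
  rw [hsh]
  have hmageq : mag = ((mag.toNat : Nat) : Int) := by omega
  rw [hmageq]
  have hshift : (((mag.toNat : Nat) : Int)) >>> (W.toNat - 1 - j) = (((mag.toNat >>> (W.toNat - 1 - j) : Nat)) : Int) := by
    simp [Int.natCast_shiftRight]
  rw [hshift]
  have h1 : (1 : Int) = ((1 : Nat) : Int) := rfl
  rw [h1, PySem.Int.band_natCast, PySem.Int.bxor_natCast]
  have e1 : (max mag 0).toNat = mag.toNat := by omega
  have e2 : (max W 0).toNat = W.toNat := by omega
  simp [e1, e2]

theorem pv_main (n bits : Int) :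
    to_ones_comp_binary_from_dec n bits = to_ones_comp_binary_from_dec_alt n bits := by
  unfold to_ones_comp_binary_from_dec to_ones_comp_binary_from_dec_alt
  by_cases hn : n < 0
  · simp only [if_pos hn]
    have hmag : -n = ((n.natAbs : Nat) : Int) := by omega
    rw [hmag]
    have h0 : (0 : Int) ≤ ((n.natAbs : Nat) : Int) := by positivity
    have := pvAlt_eq ((n.natAbs : Nat) : Int) bits 1 h0
    simp only [Int.toNat_natCast, Nat.cast_one] at this
    rw [this, pvUnsigned_eq n.natAbs bits, pvFlip_map _ (pvG_le_one _ _)]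
  · simp only [if_neg hn]
    have hmag : n = ((n.toNat : Nat) : Int) := by omega
    rw [hmag]
    have h0 : (0 : Int) ≤ ((n.toNat : Nat) : Int) := by positivity
    have := pvAlt_eq ((n.toNat : Nat) : Int) bits 0 h0
    simp only [Int.toNat_natCast, Nat.cast_zero] at this
    rw [this, pvUnsigned_eq n.toNat bits]
    simp

-- ===== VERDICT (by name: the statement is the Claim_ definition above) =====
theorem to_ones_comp_binary_from_dec_spec : Claim_equal_to_ones_comp_binary_from_dec := by
  intro n bits _
  unfold Spec_to_ones_comp_binary_from_dec
  exact pv_main n bits
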